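-- pv_equiv track=rewrite | github.com/Saxena224pawan/Multimodal_Final_SceneWeaver | scripts/generate_appendix_story_figures.py | padded_frame_indices
-- ===== SOURCE A (Python) =====
-- from typing import Dict, Iterable, List, Optional, Sequence, Tuple
--
-- def padded_frame_indices(frame_count: int, count: int, from_end: bool) -> List[int]:
--     if frame_count <= 0:
--         raise ValueError("frame_count must be positive")
--     if from_end:
--         indices = list(range(max(0, frame_count - count), frame_count))
--         while len(indices) < count:
--             indices.insert(0, indices[0])
--         return indices
--     indices = list(range(min(frame_count, count)))
--     while len(indices) < count:
--         indices.append(indices[-1])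
--     return indices
-- ===== SOURCE B (Python) =====
-- def padded_frame_indices(frame_count: int, count: int, from_end: bool):
--     if frame_count <= 0:
--         raise ValueError("frame_count must be positive")
--     if from_end:
--         return [max(0, frame_count - count + i) for i in range(count)]
--     return [min(i, frame_count - 1) for i in range(count)]
-- ===== Notes on version B (the rewrite author's own statement) =====
-- stated objective: simpler
-- what changed: A builds a range list and then repeatedly pads it (insert at front / append at back) until it reaches count; B never pads: it computes each output index directly by clamping in a single comprehension over range(count).
import Mathlib
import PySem

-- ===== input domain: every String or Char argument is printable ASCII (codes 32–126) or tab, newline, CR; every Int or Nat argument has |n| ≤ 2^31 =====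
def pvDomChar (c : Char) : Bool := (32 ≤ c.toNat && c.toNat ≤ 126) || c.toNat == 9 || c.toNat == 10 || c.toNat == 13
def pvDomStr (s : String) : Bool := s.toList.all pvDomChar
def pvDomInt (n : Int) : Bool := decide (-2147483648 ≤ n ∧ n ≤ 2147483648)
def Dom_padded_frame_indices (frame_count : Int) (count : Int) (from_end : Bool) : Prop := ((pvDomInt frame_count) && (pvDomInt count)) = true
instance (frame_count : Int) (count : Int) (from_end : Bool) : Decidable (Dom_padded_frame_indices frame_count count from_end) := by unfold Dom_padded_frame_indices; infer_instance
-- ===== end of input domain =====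

-- B replaces A's range-then-pad loops by one direct per-index clamp; equal on all inputs where A returns (frame_count > 0).

-- ===== PORT A =====
-- while len(indices) < count: indices.insert(0, indices[0])
-- ([] case: the loop body would raise IndexError on indices[0]; unreachable when frame_count > 0)
def padFrontA (count : Int) (indices : List Int) : List Int :=
  match indices with
  | [] => []
  | x :: xs =>
    if ((x :: xs).length : Int) < count then padFrontA count (x :: x :: xs) else x :: xs
termination_by (count - indices.length).toNat
decreasing_by simp only [List.length_cons] at *; omega

-- while len(indices) < count: indices.append(indices[-1])
-- (indices[-1] on a nonempty list = getLast?; the none case would raise IndexError, unreachable when frame_count > 0)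
def padBackA (count : Int) (indices : List Int) : List Int :=
  if (indices.length : Int) < count then
    match indices.getLast? with
    | none => indices
    | some x => padBackA count (indices ++ [x])
  else indices
termination_by (count - indices.length).toNat
decreasing_by simp only [List.length_append, List.length_cons, List.length_nil] at *; omega

def padded_frame_indices (frame_count : Int) (count : Int) (from_end : Bool) : List Int :=
  if frame_count ≤ 0 then []  -- A raises ValueError here; excluded by Pre_
  else if from_end then
    padFrontA count (PySem.List.pyRange (max 0 (frame_count - count)) frame_count 1)
  else
    padBackA count (PySem.List.pyRange 0 (min frame_count count) 1)

-- ===== PORT B =====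
def padded_frame_indices_alt (frame_count : Int) (count : Int) (from_end : Bool) : List Int :=
  if frame_count ≤ 0 then []  -- B raises ValueError here; excluded by Pre_
  else if from_end then
    (PySem.List.pyRange 0 count 1).map (fun i => max 0 (frame_count - count + i))
  else
    (PySem.List.pyRange 0 count 1).map (fun i => min i (frame_count - 1))

-- ===== PRECONDITION & SPEC =====
-- A raises ValueError exactly when frame_count <= 0; Pre_ excludes only those inputs.
def Pre_padded_frame_indices (frame_count : Int) (count : Int) (from_end : Bool) : Prop := 0 < frame_count
instance (frame_count : Int) (count : Int) (from_end : Bool) : Decidable (Pre_padded_frame_indices frame_count count from_end) := by unfold Pre_padded_frame_indices; infer_instance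
def pvWitness_padded_frame_indices : Int × Int × Bool := (3, 5, true)

def Spec_padded_frame_indices (frame_count : Int) (count : Int) (from_end : Bool) (out : List Int) : Prop := out = padded_frame_indices_alt frame_count count from_end
instance (frame_count : Int) (count : Int) (from_end : Bool) (out : List Int) : Decidable (Spec_padded_frame_indices frame_count count from_end out) := by unfold Spec_padded_frame_indices; infer_instance

-- ===== CLAIM (what is proved, stated in full; the proofs are below) =====
def Claim_equal_padded_frame_indices : Prop := ∀ (frame_count : Int) (count : Int) (from_end : Bool), Dom_padded_frame_indices frame_count count from_end → Pre_padded_frame_indices frame_count count from_end → Spec_padded_frame_indices frame_count count from_end (padded_frame_indices frame_count count from_end)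

-- ===== LEMMAS AND PROOFS =====

lemma padFrontA_nil (count : Int) : padFrontA count [] = [] := by
  rw [padFrontA.eq_def]

lemma padFrontA_noop (count : Int) (l : List Int) (h : ¬ (l.length : Int) < count) :
    padFrontA count l = l := by
  cases l with
  | nil => rw [padFrontA.eq_def]
  | cons x xs => rw [padFrontA.eq_def]; simp_all

lemma padBackA_noop (count : Int) (l : List Int) (h : ¬ (l.length : Int) < count) :
    padBackA count l = l := by
  rw [padBackA.eq_def]; simp [h]

lemma padFrontA_spec (count : Int) : ∀ (n : Nat) (x : Int) (xs : List Int),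
    n = (count - (x :: xs).length).toNat →
    padFrontA count (x :: xs) = List.replicate n x ++ (x :: xs) := by
  intro n
  induction n with
  | zero =>
    intro x xs h
    rw [padFrontA.eq_def]
    have : ¬ ((xs.length : Int) + 1 < count) := by simp at h; omega
    simp [this]
  | succ n ih =>
    intro x xs h
    rw [padFrontA.eq_def]
    have hlt : ((x :: xs).length : Int) < count := by simp at h ⊢; omega
    simp only [hlt, if_pos]
    rw [ih x (x :: xs) (by simp at h ⊢; omega)]
    simp [List.replicate_succ']

lemma padBackA_spec (count : Int) : ∀ (n : Nat) (l : List Int) (y : Int),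
    l.getLast? = some y →
    n = (count - l.length).toNat →
    padBackA count l = l ++ List.replicate n y := by
  intro n
  induction n with
  | zero =>
    intro l y hy h
    rw [padBackA.eq_def]
    have : ¬ (l.length : Int) < count := by omega
    simp [this]
  | succ n ih =>
    intro l y hy h
    rw [padBackA.eq_def]
    have hlt : (l.length : Int) < count := by omega
    simp only [hlt, if_pos, hy]
    rw [ih (l ++ [y]) y (by simp) (by simp; omega)]
    simp [List.replicate_succ]

-- ===== VERDICT =====
theorem padded_frame_indices_spec : Claim_equal_padded_frame_indices := by
  intro fc count fe _ hpre
  unfold Spec_padded_frame_indices padded_frame_indices padded_frame_indices_alt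
  unfold Pre_padded_frame_indices at hpre
  have hfc : ¬ fc ≤ 0 := by omega
  simp only [hfc, if_false, ite_false]
  cases fe with
  | true =>
    simp only [if_pos]
    by_cases hc0 : count ≤ 0
    · have h1 : max 0 (fc - count) = fc - count := by omega
      rw [h1, PySem.List.pyRange_one_eq_nil (by omega),
          PySem.List.pyRange_one_eq_nil (by omega)]
      simp [padFrontA_nil]
    · by_cases hcfc : count ≤ fc
      · -- no padding needed
        have h1 : max 0 (fc - count) = fc - count := by omega
        rw [h1, padFrontA_noop count _ (by rw [PySem.List.length_pyRange_one]; omega)]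
        rw [PySem.List.pyRange_one, PySem.List.pyRange_one, List.map_map]
        have hlen : (fc - (fc - count)).toNat = (count - 0).toNat := by omega
        rw [hlen]
        apply List.map_congr_left
        intro k hk
        simp at hk ⊢
        omega
      · -- count > fc : padding with leading zeros
        have h1 : max 0 (fc - count) = 0 := by omega
        rw [h1]
        have hcons : PySem.List.pyRange 0 fc 1 = 0 :: PySem.List.pyRange 1 fc 1 :=
          PySem.List.pyRange_one_cons (by omega)
        rw [hcons, padFrontA_spec count ((count - (0 :: PySem.List.pyRange 1 fc 1).length).toNat) 0 _ rfl]
        rw [PySem.List.pyRange_one_append 0 (count - fc) count (by omega) (by omega)]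
        rw [List.map_append]
        congr 1
        · symm
          rw [List.eq_replicate_iff]
          refine ⟨?_, ?_⟩
          · simp [PySem.List.length_pyRange_one]
            omega
          · intro b hb
            simp only [List.mem_map] at hb
            obtain ⟨i, hi, rfl⟩ := hb
            rw [PySem.List.mem_pyRange_one] at hi
            omega
        · rw [← hcons]
          rw [PySem.List.pyRange_one, PySem.List.pyRange_one, List.map_map]
          have hlen : (count - (count - fc)).toNat = (fc - 0).toNat := by omega
          rw [hlen]
          apply List.map_congr_left
          intro k hk
          simp at hk ⊢
          omega
  | false =>
    simp only [Bool.false_eq_true, if_neg, ite_false]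
    by_cases hc0 : count ≤ 0
    · have h1 : min fc count = count := by omega
      rw [h1, PySem.List.pyRange_one_eq_nil (by omega)]
      rw [padBackA.eq_def]
      simp
    · by_cases hcfc : count ≤ fc
      · have h1 : min fc count = count := by omega
        rw [h1, padBackA_noop count _ (by rw [PySem.List.length_pyRange_one]; omega)]
        rw [PySem.List.pyRange_one, List.map_map]
        apply List.map_congr_left
        intro k hk
        simp at hk ⊢
        omega
      · -- count > fc : trailing copies of fc - 1
        have h1 : min fc count = fc := by omega
        rw [h1]
        have hsplit : PySem.List.pyRange 0 fc 1 = PySem.List.pyRange 0 (fc - 1) 1 ++ [fc - 1] := by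
          have := PySem.List.pyRange_one_succ_right (a := 0) (b := fc - 1) (by omega)
          simpa using this
        have hlast : (PySem.List.pyRange 0 fc 1).getLast? = some (fc - 1) := by
          rw [hsplit]; simp
        rw [padBackA_spec count ((count - (PySem.List.pyRange 0 fc 1).length).toNat) _ (fc - 1) hlast rfl]
        rw [PySem.List.pyRange_one_append 0 fc count (by omega) (by omega)]
        rw [List.map_append]
        congr 1
        · rw [PySem.List.pyRange_one, List.map_map]
          apply List.map_congr_left
          intro k hk
          simp at hk ⊢
          omega
        · symm
          rw [List.eq_replicate_iff]
          refine ⟨?_, ?_⟩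
          · simp [PySem.List.length_pyRange_one]
            omega
          · intro b hb
            simp only [List.mem_map] at hb
            obtain ⟨i, hi, rfl⟩ := hb
            rw [PySem.List.mem_pyRange_one] at hi
            omega
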